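-- pv_equiv track=rewrite | github.com/buzzqw/NotePadPQ | core/text_tools.py | spaces_to_tabs
-- ===== SOURCE A (Python) =====
-- def spaces_to_tabs(text: str, tab_width: int = 4) -> str:
--     """Converte gruppi di spazi iniziali in tab."""
--     lines = []
--     for line in text.split("\n"):
--         stripped = line.lstrip(" ")
--         spaces = len(line) - len(stripped)
--         tabs = spaces // tab_width
--         remainder = spaces % tab_width
--         lines.append("\t" * tabs + " " * remainder + stripped)
--     return "\n".join(lines)
-- ===== SOURCE B (Python) =====
-- def spaces_to_tabs(text: str, tab_width: int = 4) -> str: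
--     """Single left-to-right scan over the whole text (no line list, no join):
--     at each line start the run of spaces is measured and emitted as tabs +
--     remainder spaces, then the rest of the line is copied verbatim."""
--     out = []
--     i, n = 0, len(text)
--     while i < n:
--         j = i
--         while j < n and text[j] == ' ':
--             j += 1
--         k = j - i
--         out.append('\t' * (k // tab_width) + ' ' * (k % tab_width))
--         while j < n and text[j] != '\n':
--             out.append(text[j])
--             j += 1
--         if j < n:
--             out.append('\n')
--             j += 1
--         i = j
--     return ''.join(out)
-- ===== Notes on version B (the rewrite author's own statement) =====
-- stated objective: simpler
-- what changed: Instead of splitting the text into a line list, rebuilding each line and joining, B makes one left-to-right scan of the whole text, emitting tabs+remainder at each line start and copying the rest of every line verbatim.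
import Mathlib
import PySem

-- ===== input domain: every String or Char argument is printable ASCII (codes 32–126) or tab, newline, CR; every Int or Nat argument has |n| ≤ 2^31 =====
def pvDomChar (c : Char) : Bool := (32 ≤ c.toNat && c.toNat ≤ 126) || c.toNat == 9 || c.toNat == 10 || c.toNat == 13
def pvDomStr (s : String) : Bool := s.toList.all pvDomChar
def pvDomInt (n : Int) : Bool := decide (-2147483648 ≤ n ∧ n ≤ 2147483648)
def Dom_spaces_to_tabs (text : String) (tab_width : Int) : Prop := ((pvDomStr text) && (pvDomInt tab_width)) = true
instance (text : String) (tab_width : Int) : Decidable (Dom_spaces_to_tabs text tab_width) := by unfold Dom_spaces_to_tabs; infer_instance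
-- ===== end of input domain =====

-- B replaces A's split-lines / per-line rebuild / join pipeline with a single
-- left-to-right scan of the text (simpler decomposition, same O(n) cost).


-- ===== PORT A =====
-- text.split("\n"); per line: lstrip(" ") (exact: dropWhile (· == ' ')),
-- "\t"*(spaces//tw) + " "*(spaces%tw) + stripped, appended to lines; "\n".join(lines).
def spaces_to_tabs (text : String) (tab_width : Int) : String :=
  let lines := (PySem.Chars.splitOn text.toList ['\n']).foldl
    (fun acc line =>
      let stripped := line.dropWhile (fun c => c == ' ')
      let spaces : Int := (line.length : Int) - (stripped.length : Int)
      acc ++ [PySem.List.pyRepeat ['\t'] (PySem.Int.floordiv spaces tab_width) ++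
              PySem.List.pyRepeat [' '] (PySem.Int.mod spaces tab_width) ++ stripped]) []
  String.ofList (PySem.Chars.join ['\n'] lines)

-- ===== PORT B =====
-- '\t' * (k // tab_width) + ' ' * (k % tab_width)
def pvEmit (tab_width k : Int) : List Char :=
  PySem.List.pyRepeat ['\t'] (PySem.Int.floordiv k tab_width) ++
  PySem.List.pyRepeat [' '] (PySem.Int.mod k tab_width)

mutual
-- at a line start (while i < n): measure the run of spaces, emit tabs + remainder
def pvLine (tab_width : Int) (cs : List Char) : List Char :=
  match cs with
  | [] => []
  | c :: t =>
    let sp := (c :: t).takeWhile (fun x => x == ' ')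
    pvEmit tab_width (sp.length : Int) ++ pvRest tab_width ((c :: t).drop sp.length)
termination_by 2 * cs.length + 1
decreasing_by simp only [List.length_drop, List.length_cons]; omega

-- copy the rest of the line verbatim; after '\n' we are at a line start again
def pvRest (tab_width : Int) (cs : List Char) : List Char :=
  match cs with
  | [] => []
  | c :: t => if c == '\n' then '\n' :: pvLine tab_width t else c :: pvRest tab_width t
termination_by 2 * cs.length
decreasing_by all_goals simp only [List.length_cons]; omega
end

def spaces_to_tabs_alt (text : String) (tab_width : Int) : String :=
  String.ofList (pvLine tab_width text.toList)

-- ===== PRECONDITION & SPEC =====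
-- Python A raises ZeroDivisionError whenever tab_width = 0 (spaces // tab_width runs on every line).
def Pre_spaces_to_tabs (text : String) (tab_width : Int) : Prop := tab_width ≠ 0
instance (text : String) (tab_width : Int) : Decidable (Pre_spaces_to_tabs text tab_width) := by unfold Pre_spaces_to_tabs; infer_instance
def pvWitness_spaces_to_tabs : String × Int := ("      indented\n  x\nplain", 4)

def Spec_spaces_to_tabs (text : String) (tab_width : Int) (out : String) : Prop := out = spaces_to_tabs_alt text tab_width
instance (text : String) (tab_width : Int) (out : String) : Decidable (Spec_spaces_to_tabs text tab_width out) := by unfold Spec_spaces_to_tabs; infer_instance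

-- ===== CLAIM (what is proved, stated in full; the proofs are below) =====
def Claim_equal_spaces_to_tabs : Prop := ∀ (text : String) (tab_width : Int), Dom_spaces_to_tabs text tab_width → Pre_spaces_to_tabs text tab_width → Spec_spaces_to_tabs text tab_width (spaces_to_tabs text tab_width)

-- ===== LEMMAS AND PROOFS =====

-- simple structural model of text.split("\n")
def splitNL : List Char → List (List Char)
  | [] => [[]]
  | c :: t =>
    if c = '\n' then [] :: splitNL t
    else
      match splitNL t with
      | [] => [[c]]
      | h :: r => (c :: h) :: r

theorem splitNL_ne_nil (l : List Char) : splitNL l ≠ [] := by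
  cases l with
  | nil => simp [splitNL]
  | cons c t =>
    simp only [splitNL]
    split
    · simp
    · split <;> simp

theorem splitOn_go_spec (l : List Char) : ∀ (fuel : Nat) (cur : List Char) (acc : List (List Char)),
    l.length < fuel →
    PySem.Chars.splitOn.go ['\n'] fuel l cur acc =
      acc.reverse ++ (cur.reverse ++ (splitNL l).headI) :: (splitNL l).tail := by
  induction l with
  | nil =>
    intro fuel cur acc h
    match fuel, h with
    | fuel + 1, _ => simp [PySem.Chars.splitOn.go, splitNL]
  | cons c t ih =>
    intro fuel cur acc h
    simp only [List.length_cons] at h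
    match fuel, h with
    | fuel + 1, _ =>
      by_cases hc : c = '\n'
      · subst hc
        have hpre : List.isPrefixOf ['\n'] ('\n' :: t) = true := by simp [List.isPrefixOf]
        rw [PySem.Chars.splitOn.go, if_pos hpre]
        simp only [List.length_cons, List.length_nil, List.drop_succ_cons, List.drop_zero]
        rw [ih fuel [] (cur.reverse :: acc) (by omega)]
        obtain ⟨h2, r2, hsp⟩ : ∃ h2 r2, splitNL t = h2 :: r2 := by
          cases hsp : splitNL t with
          | nil => exact absurd hsp (splitNL_ne_nil t)
          | cons a b => exact ⟨a, b, rfl⟩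
        simp [splitNL, hsp]
      · have hpre : List.isPrefixOf ['\n'] (c :: t) = false := by
          simp [List.isPrefixOf]
          exact fun h => absurd h.symm hc
        rw [PySem.Chars.splitOn.go, if_neg (by simp [hpre])]
        rw [ih fuel (c :: cur) acc (by omega)]
        obtain ⟨h2, r2, hsp⟩ : ∃ h2 r2, splitNL t = h2 :: r2 := by
          cases hsp : splitNL t with
          | nil => exact absurd hsp (splitNL_ne_nil t)
          | cons a b => exact ⟨a, b, rfl⟩
        simp [splitNL, hc, hsp]

theorem splitOn_eq (l : List Char) : PySem.Chars.splitOn l ['\n'] = splitNL l := by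
  rw [PySem.Chars.splitOn, splitOn_go_spec l (l.length + 1) [] [] (by omega)]
  obtain ⟨h2, r2, hsp⟩ : ∃ h2 r2, splitNL l = h2 :: r2 := by
    cases hsp : splitNL l with
    | nil => exact absurd hsp (splitNL_ne_nil l)
    | cons a b => exact ⟨a, b, rfl⟩
  simp [hsp]


-- the per-line transform of port A, rewritten through pvEmit
def pvConv (tab_width : Int) (line : List Char) : List Char :=
  pvEmit tab_width ((line.takeWhile (fun c => c == ' ')).length : Int) ++
  line.dropWhile (fun c => c == ' ')

theorem convA_eq_pvConv (tab_width : Int) (line : List Char) :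
    PySem.List.pyRepeat ['\t'] (PySem.Int.floordiv ((line.length : Int) - ((line.dropWhile (fun c => c == ' ')).length : Int)) tab_width) ++
    PySem.List.pyRepeat [' '] (PySem.Int.mod ((line.length : Int) - ((line.dropWhile (fun c => c == ' ')).length : Int)) tab_width) ++
    line.dropWhile (fun c => c == ' ') = pvConv tab_width line := by
  have hlen : (line.takeWhile (fun c => c == ' ')).length +
      (line.dropWhile (fun c => c == ' ')).length = line.length := by
    conv_rhs => rw [← List.takeWhile_append_dropWhile (p := fun c => c == ' ') (l := line)]
    rw [List.length_append]
  have harg : (line.length : Int) - ((line.dropWhile (fun c => c == ' ')).length : Int) =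
      (((line.takeWhile (fun c => c == ' ')).length : Nat) : Int) := by omega
  rw [harg, pvConv, pvEmit, List.append_assoc]

theorem foldl_push_eq_map (f : List Char → List Char) (l : List (List Char)) :
    ∀ acc, l.foldl (fun acc line => acc ++ [f line]) acc = acc ++ l.map f := by
  induction l with
  | nil => intro acc; simp
  | cons h t ih => intro acc; simp [ih]

theorem pvEmit_zero (tw : Int) : pvEmit tw 0 = [] := by
  simp [pvEmit, PySem.Int.floordiv, PySem.Int.mod, Int.zero_fdiv, Int.zero_fmod,
        PySem.List.pyRepeat_singleton]

theorem pvConv_split (tw : Int) (sp rest : List Char) (hsp : ∀ x ∈ sp, (x == ' ') = true)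
    (hrest : rest = [] ∨ ∃ r rt, rest = r :: rt ∧ (r == ' ') = false) :
    pvConv tw (sp ++ rest) = pvEmit tw (sp.length : Int) ++ rest := by
  have htw : (sp ++ rest).takeWhile (fun c => c == ' ') = sp := by
    rw [List.takeWhile_append, if_pos (by rw [List.takeWhile_eq_self_iff.2 hsp])]
    rcases hrest with h | ⟨r, rt, hr, hrs⟩
    · simp [h]
    · simp [hr, hrs]
  have hdw : (sp ++ rest).dropWhile (fun c => c == ' ') = rest := by
    have hnil : sp.dropWhile (fun c => c == ' ') = [] := List.dropWhile_eq_nil_iff.2 hsp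
    rw [List.dropWhile_append, if_pos (by simp [hnil])]
    rcases hrest with h | ⟨r, rt, hr, hrs⟩
    · simp [h]
    · simp [hr, hrs]
  rw [pvConv, htw, hdw]

theorem drop_takeWhile_length (p : Char → Bool) (l : List Char) :
    l.drop (l.takeWhile p).length = l.dropWhile p := by
  induction l with
  | nil => simp
  | cons c t ih =>
    by_cases h : p c <;> simp [h, ih]

theorem pvRest_no_nl (tw : Int) (l : List Char) (h : '\n' ∉ l) : pvRest tw l = l := by
  induction l with
  | nil => simp [pvRest]
  | cons c t ih =>
    simp only [List.mem_cons, not_or] at h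
    rw [pvRest]
    simp only [beq_iff_eq]
    rw [if_neg (Ne.symm h.1), ih h.2]

theorem pvRest_append (tw : Int) (pre suf : List Char) (h : '\n' ∉ pre) :
    pvRest tw (pre ++ '\n' :: suf) = pre ++ '\n' :: pvLine tw suf := by
  induction pre with
  | nil => simp [pvRest]
  | cons c t ih =>
    simp only [List.mem_cons, not_or] at h
    rw [List.cons_append, pvRest]
    simp only [beq_iff_eq]
    rw [if_neg (Ne.symm h.1), ih h.2, List.cons_append]

theorem splitNL_append (pre l : List Char) (h : '\n' ∉ pre) :
    splitNL (pre ++ l) = (pre ++ (splitNL l).headI) :: (splitNL l).tail := by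
  induction pre with
  | nil =>
    obtain ⟨a, b, hsp⟩ : ∃ a b, splitNL l = a :: b := by
      cases hsp : splitNL l with
      | nil => exact absurd hsp (splitNL_ne_nil l)
      | cons a b => exact ⟨a, b, rfl⟩
    simp [hsp]
  | cons c t ih =>
    simp only [List.mem_cons, not_or] at h
    rw [List.cons_append]
    rw [splitNL, if_neg (Ne.symm h.1), ih h.2]
    simp

theorem dropWhile_head_false (p : Char → Bool) (l : List Char) (r : Char) (rt : List Char)
    (h : l.dropWhile p = r :: rt) : p r = false := by
  induction l with
  | nil => simp at h
  | cons c t ih =>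
    rw [List.dropWhile_cons] at h
    by_cases hc : p c
    · rw [if_pos hc] at h; exact ih h
    · rw [if_neg hc] at h
      cases h
      simpa using hc

theorem splitNL_cons_nl (t : List Char) : splitNL ('\n' :: t) = [] :: splitNL t := by
  rw [splitNL, if_pos rfl]

theorem splitNL_no_nl (l : List Char) (h : '\n' ∉ l) : splitNL l = [l] := by
  have h2 := splitNL_append l [] h
  simpa [splitNL] using h2

theorem main_base (tw : Int) :
    PySem.Chars.join ['\n'] ((splitNL []).map (pvConv tw)) = pvLine tw [] := by
  have h : pvConv tw [] = [] := by
    simp [pvConv, pvEmit_zero]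
  simp [splitNL, PySem.Chars.join_singleton, h, pvLine]

theorem main_eq (tw : Int) : ∀ (n : Nat) (cs : List Char), cs.length ≤ n →
    PySem.Chars.join ['\n'] ((splitNL cs).map (pvConv tw)) = pvLine tw cs := by
  intro n
  induction n with
  | zero =>
    intro cs h
    have hnil : cs = [] := List.eq_nil_of_length_eq_zero (by omega)
    subst hnil
    exact main_base tw
  | succ n ih =>
    intro cs hlen
    match cs with
    | [] => exact main_base tw
    | c :: t =>
      have hLine : pvLine tw (c :: t) =
          pvEmit tw ((((c :: t).takeWhile (fun x => x == ' ')).length : Nat) : Int) ++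
          pvRest tw ((c :: t).drop ((c :: t).takeWhile (fun x => x == ' ')).length) := by
        rw [pvLine]
      rw [hLine, drop_takeWhile_length]
      have hspall : ∀ x ∈ (c :: t).takeWhile (fun x => x == ' '), (x == ' ') = true :=
        fun x hx => List.mem_takeWhile_imp (p := fun x => x == ' ') hx
      have hsp_no_nl : '\n' ∉ (c :: t).takeWhile (fun x => x == ' ') := by
        intro hx
        have := hspall _ hx
        simp at this
      have hsplit : (c :: t) = (c :: t).takeWhile (fun x => x == ' ') ++
          (c :: t).dropWhile (fun x => x == ' ') := (List.takeWhile_append_dropWhile).symm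
      cases hre : (c :: t).dropWhile (fun x => x == ' ') with
      | nil =>
        rw [hre] at hsplit
        conv_lhs => rw [hsplit]
        rw [splitNL_no_nl _ (by simpa using hsp_no_nl)]
        simp only [List.map_cons, List.map_nil]
        rw [PySem.Chars.join_singleton]
        have := pvConv_split tw ((c :: t).takeWhile (fun x => x == ' ')) [] hspall (Or.inl rfl)
        simpa [pvRest] using this
      | cons r rt =>
        have hr : (r == ' ') = false := dropWhile_head_false (fun x => x == ' ') (c :: t) r rt hre
        have hpre_no_nl : '\n' ∉ (r :: rt).takeWhile (fun x => !(x == '\n')) := by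
          intro hx
          have := List.mem_takeWhile_imp (p := fun x => !(x == '\n')) hx
          simp at this
        have hrsplit : r :: rt = (r :: rt).takeWhile (fun x => !(x == '\n')) ++
            (r :: rt).dropWhile (fun x => !(x == '\n')) := (List.takeWhile_append_dropWhile).symm
        have hpre_shape : (r :: rt).takeWhile (fun x => !(x == '\n')) = [] ∨
            ∃ p0 pt, (r :: rt).takeWhile (fun x => !(x == '\n')) = p0 :: pt ∧ (p0 == ' ') = false := by
          rw [List.takeWhile_cons]
          by_cases hrn : (!(r == '\n')) = true
          · exact Or.inr ⟨r, _, by rw [if_pos hrn], hr⟩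
          · rw [if_neg hrn]; exact Or.inl rfl
        cases hre2 : (r :: rt).dropWhile (fun x => !(x == '\n')) with
        | nil =>
          have hno_nl : '\n' ∉ r :: rt := by
            have hall := List.dropWhile_eq_nil_iff.1 hre2
            intro hx
            have := hall _ hx
            simp at this
          have hcs : (c :: t) = (c :: t).takeWhile (fun x => x == ' ') ++ (r :: rt) := by
            conv_lhs => rw [hsplit]
            rw [hre]
          conv_lhs => rw [hcs]
          rw [splitNL_no_nl _ (by
            intro hx
            rcases List.mem_append.1 hx with h1 | h1
            · exact hsp_no_nl h1
            · exact hno_nl h1)]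
          simp only [List.map_cons, List.map_nil]
          rw [PySem.Chars.join_singleton]
          rw [pvConv_split tw _ (r :: rt) hspall (Or.inr ⟨r, rt, rfl, hr⟩)]
          rw [pvRest_no_nl tw (r :: rt) hno_nl]
        | cons d dt =>
          have hd : (!(d == '\n')) = false :=
            dropWhile_head_false (fun x => !(x == '\n')) (r :: rt) d dt hre2
          have hd' : d = '\n' := by simpa using hd
          subst hd'
          have hrest : r :: rt = (r :: rt).takeWhile (fun x => !(x == '\n')) ++ '\n' :: dt := by
            conv_lhs => rw [hrsplit]
            rw [hre2]
          have hcs : (c :: t) = ((c :: t).takeWhile (fun x => x == ' ') ++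
              (r :: rt).takeWhile (fun x => !(x == '\n'))) ++ '\n' :: dt := by
            conv_lhs => rw [hsplit]
            rw [hre]
            conv_lhs => rw [hrest]
            rw [List.append_assoc]
          have hdtlen : dt.length ≤ n := by
            have := congrArg List.length hcs
            simp only [List.length_cons, List.length_append] at this ⊢
            simp only [List.length_cons] at hlen
            omega
          conv_lhs => rw [hcs]
          rw [splitNL_append _ ('\n' :: dt) (by
            intro hx
            rcases List.mem_append.1 hx with h1 | h1
            · exact hsp_no_nl h1
            · exact hpre_no_nl h1)]
          rw [splitNL_cons_nl]
          simp only [List.headI, List.tail, List.append_nil]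
          obtain ⟨a, b, hab⟩ : ∃ a b, splitNL dt = a :: b := by
            cases hab : splitNL dt with
            | nil => exact absurd hab (splitNL_ne_nil dt)
            | cons a b => exact ⟨a, b, rfl⟩
          rw [hab]
          simp only [List.map_cons]
          rw [PySem.Chars.join_cons_cons]
          have hjoin : PySem.Chars.join ['\n'] (pvConv tw a :: (b.map (pvConv tw))) =
              pvLine tw dt := by
            have := ih dt hdtlen
            rw [hab] at this
            simpa using this
          rw [hjoin]
          rw [List.append_assoc,
              pvConv_split tw _ ((r :: rt).takeWhile (fun x => !(x == '\n'))) hspall hpre_shape]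
          conv_rhs => rw [hrest]
          rw [pvRest_append tw _ dt hpre_no_nl]
          simp

-- ===== VERDICT (by name: the statement is the Claim_ definition above) =====
theorem spaces_to_tabs_spec : Claim_equal_spaces_to_tabs := by
  intro text tab_width _ _
  unfold Spec_spaces_to_tabs spaces_to_tabs spaces_to_tabs_alt
  rw [splitOn_eq, foldl_push_eq_map]
  simp only [List.nil_append]
  rw [show ((splitNL text.toList).map fun line =>
        let stripped := line.dropWhile (fun c => c == ' ')
        let spaces : Int := (line.length : Int) - (stripped.length : Int)
        PySem.List.pyRepeat ['\t'] (PySem.Int.floordiv spaces tab_width) ++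
        PySem.List.pyRepeat [' '] (PySem.Int.mod spaces tab_width) ++ stripped)
      = (splitNL text.toList).map (pvConv tab_width) from
    List.map_congr_left (fun line _ => convA_eq_pvConv tab_width line)]
  rw [main_eq tab_width text.toList.length text.toList le_rfl]
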